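-- pv_equiv track=rewrite | github.com/jailsonpj/PAA | 4.py | menor_custo
-- ===== SOURCE A (Python) =====
-- def menor_custo(s, cc):
--
--     if s == 0:
--         return s
--
--     elif cc > s:
--         return s
--
--     else:
--         setores = []
--         sum = 0
--
--         for i in range(s):
--             setores.append(i + 1)
--
--
--         qtd_cristais = 0
--         cristais_usados = 0
--         so = 0
--
--         for i in range(s+1):
--
--             if qtd_cristais < cc and cristais_usados <= s:
--                 sum = sum + setores[so]
--                 qtd_cristais = qtd_cristais + 1
--                 cristais_usados = cristais_usados + 1
--             else:
--                 so = so + 1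
--                 qtd_cristais = 0
--
--
--         return sum
-- ===== SOURCE B (Python) =====
-- def menor_custo(s, cc):
--     if s == 0 or cc > s:
--         return s
--     if cc <= 0:
--         return 0
--     q, r = divmod(s + 1, cc + 1)
--     return cc * q * (q + 1) // 2 + r * (q + 1)
-- ===== Notes on version B (the rewrite author's own statement) =====
-- stated objective: faster
-- what changed: Replaced the O(s) simulation (building a list of s sectors and stepping through s+1 loop iterations) with a closed-form: s+1 iterations split into full (cc+1)-cycles q and remainder r via divmod, giving cc*q*(q+1)//2 + r*(q+1).
import Mathlib
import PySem

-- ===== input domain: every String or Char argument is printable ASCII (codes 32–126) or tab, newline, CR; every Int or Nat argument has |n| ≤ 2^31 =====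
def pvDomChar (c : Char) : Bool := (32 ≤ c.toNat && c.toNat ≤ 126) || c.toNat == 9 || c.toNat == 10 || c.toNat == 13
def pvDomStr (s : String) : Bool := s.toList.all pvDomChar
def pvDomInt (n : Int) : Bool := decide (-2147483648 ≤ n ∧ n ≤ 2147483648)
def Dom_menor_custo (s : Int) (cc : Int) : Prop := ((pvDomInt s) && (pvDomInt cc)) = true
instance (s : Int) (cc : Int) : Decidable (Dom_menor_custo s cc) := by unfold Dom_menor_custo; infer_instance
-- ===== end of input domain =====

-- B replaces A's O(s) loop simulation with the O(1) closed form cc*q*(q+1)//2 + r*(q+1), q,r = divmod(s+1, cc+1).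


-- ===== PORT A =====
-- loop body of A's second for-loop (state: sum, qtd_cristais, cristais_usados, so)
def pvStepA (s cc : Int) (setores : List Int) (st : Int × Int × Int × Int) :
    Int × Int × Int × Int :=
  if st.2.1 < cc ∧ st.2.2.1 ≤ s then
    -- setores[so]: the index is always in range whenever this branch reads it
    -- (proved below), so pyGetD with default 0 is exact here.
    (st.1 + PySem.List.pyGetD setores st.2.2.2 0, st.2.1 + 1, st.2.2.1 + 1, st.2.2.2)
  else
    (st.1, 0, st.2.2.1, st.2.2.2 + 1)

def menor_custo (s : Int) (cc : Int) : Int :=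
  if s = 0 then s
  else if cc > s then s
  else
    let setores : List Int :=
      (PySem.List.pyRange 0 s 1).foldl (fun acc i => acc ++ [i + 1]) []
    let final :=
      (PySem.List.pyRange 0 (s + 1) 1).foldl
        (fun st _ => pvStepA s cc setores st) (0, 0, 0, 0)
    final.1

-- ===== PORT B =====
def menor_custo_alt (s : Int) (cc : Int) : Int :=
  if s = 0 ∨ cc > s then s
  else if cc ≤ 0 then 0
  else
    let q := PySem.Int.floordiv (s + 1) (cc + 1)
    let r := PySem.Int.mod (s + 1) (cc + 1)
    PySem.Int.floordiv (cc * q * (q + 1)) 2 + r * (q + 1)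

-- ===== PRECONDITION & SPEC =====
def Spec_menor_custo (s : Int) (cc : Int) (out : Int) : Prop := out = menor_custo_alt s cc
instance (s : Int) (cc : Int) (out : Int) : Decidable (Spec_menor_custo s cc out) := by unfold Spec_menor_custo; infer_instance

-- ===== CLAIM (what is proved, stated in full; the proofs are below) =====
def Claim_equal_menor_custo : Prop := ∀ (s : Int) (cc : Int), Dom_menor_custo s cc → Spec_menor_custo s cc (menor_custo s cc)

-- ===== LEMMAS AND PROOFS =====

-- a foldl whose body ignores the list element is an iterate
lemma foldl_ignore_eq_iterate {α β : Type} (g : α → α) (init : α) (l : List β) :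
    l.foldl (fun st _ => g st) init = g^[l.length] init := by
  induction l generalizing init with
  | nil => rfl
  | cons a t ih => simp [List.foldl, ih, Function.iterate_succ_apply]

-- with cc ≤ 0 the then-branch never fires: sum and qtd_cristais stay 0
lemma iterA_nonpos (s cc : Int) (setores : List Int) (hcc : cc ≤ 0) (k : Nat) :
    ((pvStepA s cc setores)^[k] (0, 0, 0, 0)).1 = 0 ∧
    ((pvStepA s cc setores)^[k] (0, 0, 0, 0)).2.1 = 0 := by
  induction k with
  | zero => exact ⟨rfl, rfl⟩
  | succ k ih =>
    rcases ih with ⟨h1, h2⟩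
    rw [Function.iterate_succ_apply']
    generalize hx : (pvStepA s cc setores)^[k] (0, 0, 0, 0) = x at h1 h2 ⊢
    unfold pvStepA
    rw [if_neg (by rw [h2]; omega)]
    exact ⟨h1, rfl⟩

-- main invariant for 1 ≤ cc ≤ s: after k iterations the state is
-- (cc*q*(q+1)//2 + r*(q+1), r, k - q, q) with q, r = divmod(k, cc+1)
lemma iterA_invariant (s cc : Int) (hcc : 1 ≤ cc) (hs : cc ≤ s) (k : Nat)
    (hk : (k : Int) ≤ s + 1) :
    (pvStepA s cc ((PySem.List.pyRange 0 s 1).map (· + 1)))^[k] (0, 0, 0, 0) =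
      (PySem.Int.floordiv (cc * PySem.Int.floordiv (k : Int) (cc + 1) *
          (PySem.Int.floordiv (k : Int) (cc + 1) + 1)) 2 +
        PySem.Int.mod (k : Int) (cc + 1) * (PySem.Int.floordiv (k : Int) (cc + 1) + 1),
       PySem.Int.mod (k : Int) (cc + 1),
       (k : Int) - PySem.Int.floordiv (k : Int) (cc + 1),
       PySem.Int.floordiv (k : Int) (cc + 1)) := by
  have hb : (0 : Int) < cc + 1 := by omega
  induction k with
  | zero =>
    simp [PySem.Int.floordiv, PySem.Int.mod]
  | succ k ih =>
    have hk' : (k : Int) ≤ s := by push_cast at hk; omega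
    set Q := PySem.Int.floordiv (k : Int) (cc + 1) with hQdef
    set R := PySem.Int.mod (k : Int) (cc + 1) with hRdef
    have hid : Q * (cc + 1) + R = (k : Int) := PySem.Int.floordiv_mul_add_mod _ _
    have hR0 : 0 ≤ R := PySem.Int.mod_nonneg _ hb
    have hRlt : R < cc + 1 := PySem.Int.mod_lt _ hb
    have hQ0 : 0 ≤ Q := by
      rw [hQdef, PySem.Int.floordiv_eq_ediv_of_pos hb]
      exact Int.ediv_nonneg (by positivity) (by omega)
    have hQs : Q < s := by
      have h2Q : Q * 2 ≤ Q * (cc + 1) := by nlinarith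
      omega
    rw [Function.iterate_succ_apply', ih (by omega)]
    by_cases hcase : R < cc
    · -- mid-cycle: one more crystal added to sector Q
      have hfd : PySem.Int.floordiv ((k : Int) + 1) (cc + 1) = Q := by
        rw [PySem.Int.floordiv_eq_iff_of_pos hb]
        constructor
        · omega
        · have : (Q + 1) * (cc + 1) = Q * (cc + 1) + (cc + 1) := by ring
          omega
      have hmd : PySem.Int.mod ((k : Int) + 1) (cc + 1) = R + 1 := by
        have := PySem.Int.floordiv_mul_add_mod ((k : Int) + 1) (cc + 1)
        rw [hfd] at this; omega
      unfold pvStepA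
      rw [if_pos (show R < cc ∧ (k : Int) - Q ≤ s from ⟨hcase, by omega⟩)]
      rw [PySem.List.pyGetD_map_pyRange_of_nonneg (· + 1) s Q 0 hQ0 hQs]
      push_cast [hfd, hmd]
      simp only [Prod.mk.injEq]
      and_intros <;> first | rfl | ring | trivial
    · -- end of cycle: R = cc, reset and move to the next sector
      have hRcc : R = cc := by omega
      have hfd : PySem.Int.floordiv ((k : Int) + 1) (cc + 1) = Q + 1 := by
        rw [PySem.Int.floordiv_eq_iff_of_pos hb]
        constructor
        · have : (Q + 1) * (cc + 1) = Q * (cc + 1) + (cc + 1) := by ring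
          omega
        · have : (Q + 1 + 1) * (cc + 1) = Q * (cc + 1) + (cc + 1) + (cc + 1) := by ring
          omega
      have hmd : PySem.Int.mod ((k : Int) + 1) (cc + 1) = 0 := by
        have := PySem.Int.floordiv_mul_add_mod ((k : Int) + 1) (cc + 1)
        rw [hfd] at this
        have : (Q + 1) * (cc + 1) = Q * (cc + 1) + (cc + 1) := by ring
        omega
      unfold pvStepA
      rw [if_neg (by simp; omega)]
      push_cast [hfd, hmd]
      have hhalf : PySem.Int.floordiv (cc * Q * (Q + 1)) 2 + cc * (Q + 1) =
          PySem.Int.floordiv (cc * (Q + 1) * (Q + 1 + 1)) 2 := by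
        rw [PySem.Int.floordiv_eq_ediv_of_pos (by omega),
            PySem.Int.floordiv_eq_ediv_of_pos (by omega)]
        have h2 : cc * (Q + 1) * (Q + 1 + 1) = cc * Q * (Q + 1) + cc * (Q + 1) * 2 := by
          ring
        rw [h2, Int.add_mul_ediv_right _ _ (by omega : (2:Int) ≠ 0)]
      simp only [Prod.mk.injEq]
      and_intros <;> first | rfl | (rw [hRcc, ← hhalf]; ring) | ring | trivial

-- ===== VERDICT (by name: the statement is the Claim_ definition above) =====
theorem menor_custo_spec : Claim_equal_menor_custo := by
  intro s cc _
  unfold Spec_menor_custo menor_custo menor_custo_alt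
  by_cases h0 : s = 0
  · simp [h0]
  · by_cases h1 : cc > s
    · simp [h0, h1]
    · rw [if_neg (show ¬(s = 0 ∨ cc > s) from by tauto)]
      rw [if_neg h0, if_neg h1]
      simp only []
      rw [PySem.List.foldl_append_singleton_eq_map (· + 1) _ []]
      simp only [List.nil_append]
      rw [foldl_ignore_eq_iterate, PySem.List.length_pyRange_one]
      by_cases h2 : cc ≤ 0
      · rw [if_pos h2]
        exact (iterA_nonpos s cc _ h2 _).1
      · rw [if_neg h2]
        have hcc : 1 ≤ cc := by omega
        have hs1 : 1 ≤ s := by omega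
        have hlen : (((s + 1 - 0).toNat : Int)) = s + 1 := by omega
        rw [iterA_invariant s cc hcc (by omega) (s + 1 - 0).toNat (by omega)]
        rw [hlen]
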